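-- pv_equiv track=rewrite | github.com/KWAKMANBO/Programmers | 프로그래머스/unrated/181904. 세로 읽기/세로 읽기.py | solution
-- ===== SOURCE A (Python) =====
-- def solution(my_string, m, c):
--     answer = ''
--     r = len(my_string)//m
--     arr = [['' for _ in range(m)] for _ in range(r)]
--     #m은 열 r은 행
--     idx = 0
--     for i in range(r):
--         for j in range(m):
--             arr[i][j] = my_string[idx]
--             idx +=1
--     for i in range(r):
--         answer += arr[i][c-1]
--     return answer
-- ===== SOURCE B (Python) =====
-- def solution(my_string, m, c):
--     r = len(my_string) // m
--     return my_string[c - 1 : r * m : m]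
-- ===== Notes on version B (the rewrite author's own statement) =====
-- stated objective: simpler
-- what changed: B replaces the r×m grid construction and the cell-by-cell column concatenation with a single bounded strided slice my_string[c-1 : r*m : m].
-- outside the precondition, e.g. on solution('abcd', 2, 0): A returns 'bd', B returns 'd'; on solution('abcd', 2, -1): A returns 'ac', B returns 'c'
import Mathlib
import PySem

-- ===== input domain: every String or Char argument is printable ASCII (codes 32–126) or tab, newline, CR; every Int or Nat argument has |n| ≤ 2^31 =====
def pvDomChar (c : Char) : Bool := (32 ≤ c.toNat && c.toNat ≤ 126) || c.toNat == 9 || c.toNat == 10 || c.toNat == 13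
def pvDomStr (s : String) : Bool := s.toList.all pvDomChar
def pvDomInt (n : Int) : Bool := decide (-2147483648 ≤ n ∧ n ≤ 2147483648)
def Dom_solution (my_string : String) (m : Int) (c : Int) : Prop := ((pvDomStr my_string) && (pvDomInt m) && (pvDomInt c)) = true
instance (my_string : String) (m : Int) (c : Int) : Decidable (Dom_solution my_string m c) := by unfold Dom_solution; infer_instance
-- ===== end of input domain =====

-- B reads the c-th column with one strided slice my_string[c-1 : r*m : m] instead of building an
-- r×m grid and concatenating it cell by cell (objective: simpler).

-- ===== PORT A =====
-- cell value my_string[idx] as a one-character string (modelled as List Char); [] where Python would raise (outside Pre_)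
def pvCell (L : List Char) (idx : Int) : List Char :=
  match PySem.List.pyGet? L idx with
  | some ch => [ch]
  | none => []

def solution (my_string : String) (m : Int) (c : Int) : String :=
  let L := my_string.toList
  let r := PySem.Int.floordiv (PySem.Str.len my_string) m
  -- arr = [['' for _ in range(m)] for _ in range(r)]
  let arr0 : List (List (List Char)) :=
    (PySem.List.pyRange 0 r 1).map (fun _ => (PySem.List.pyRange 0 m 1).map (fun _ => ([] : List Char)))
  -- for i in range(r): for j in range(m): arr[i][j] = my_string[idx]; idx += 1
  let st :=
    (PySem.List.pyRange 0 r 1).foldl (fun st i =>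
      (PySem.List.pyRange 0 m 1).foldl
        (fun (st : List (List (List Char)) × Int) j =>
          (st.1.modify i.toNat (fun row => row.set j.toNat (pvCell L st.2)), st.2 + 1))
        st)
      (arr0, (0 : Int))
  -- for i in range(r): answer += arr[i][c-1]   (arr[i][c-1] read with Python indexing; [] where it would raise, outside Pre_)
  let answer :=
    (PySem.List.pyRange 0 r 1).foldl (fun ans i =>
      ans ++ (((PySem.List.pyGet? st.1 i).bind (fun row => PySem.List.pyGet? row (c - 1))).getD []))
      ([] : List Char)
  String.ofList answer

-- ===== PORT B =====
def solution_alt (my_string : String) (m : Int) (c : Int) : String :=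
  let r := PySem.Int.floordiv (PySem.Str.len my_string) m
  (PySem.Str.slice? my_string (some (c - 1)) (some (r * m)) m).getD ""

-- ===== PRECONDITION & SPEC =====
-- Pre_ excludes m = 0 (A raises ZeroDivisionError), c > m with a full first row (A raises IndexError
-- at arr[i][c-1]), and c ≤ 0 with a full first row — outside the problem's stated domain 1 ≤ c ≤ m —
-- where A happens to read a column through Python's negative-index wraparound while B's slice clamps
-- the negative start: both corner behaviours are accidents of the respective implementations.
def Pre_solution (my_string : String) (m : Int) (c : Int) : Prop :=
  m < 0 ∨ (1 ≤ m ∧ (PySem.Str.len my_string < m ∨ (1 ≤ c ∧ c ≤ m)))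
instance (my_string : String) (m : Int) (c : Int) : Decidable (Pre_solution my_string m c) := by
  unfold Pre_solution; infer_instance

def pvWitness_solution : String × Int × Int := ("dogcat", 3, 2)

def Spec_solution (my_string : String) (m : Int) (c : Int) (out : String) : Prop := out = solution_alt my_string m c
instance (my_string : String) (m : Int) (c : Int) (out : String) : Decidable (Spec_solution my_string m c out) := by unfold Spec_solution; infer_instance

-- ===== CLAIM (what is proved, stated in full; the proofs are below) =====
def Claim_equal_solution : Prop := ∀ (my_string : String) (m : Int) (c : Int), Dom_solution my_string m c → Pre_solution my_string m c → Spec_solution my_string m c (solution my_string m c)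

-- ===== LEMMAS AND PROOFS =====

lemma pv_modify_modify {β : Type} (f g : β → β) : ∀ (i : Nat) (l : List β),
    (l.modify i f).modify i g = l.modify i (fun x => g (f x)) := by
  intro i
  induction i with
  | zero => intro l; cases l <;> simp [List.modify]
  | succ k ih => intro l; cases l with
    | nil => simp [List.modify]
    | cons x t => simpa [List.modify_succ_cons] using ih t

lemma pv_modify_id {β : Type} : ∀ (i : Nat) (l : List β), l.modify i (fun x => x) = l := by
  intro i
  induction i with
  | zero => intro l; cases l <;> simp [List.modify]
  | succ k ih => intro l; cases l with
    | nil => simp [List.modify]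
    | cons x t => simpa [List.modify_succ_cons] using ih t

lemma pv_modify_append {β : Type} (x : β) (l2 : List β) (f : β → β) : ∀ (l1 : List β),
    (l1 ++ x :: l2).modify l1.length f = l1 ++ f x :: l2 := by
  intro l1
  induction l1 with
  | nil => simp [List.modify]
  | cons y t ih => simpa [List.modify_succ_cons] using ih

lemma pv_modify_append' {β : Type} (x : β) (l2 : List β) (f : β → β) (l1 : List β) (i : Nat)
    (h : l1.length = i) : (l1 ++ x :: l2).modify i f = l1 ++ f x :: l2 := by
  subst h; exact pv_modify_append x l2 f l1

lemma pv_inner_fold {β : Type} (g : Int → β) (i' : Nat) : ∀ (t : Nat) (arr : List (List β)) (idx : Int),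
    ((List.range t).map (fun k : Nat => (k : Int))).foldl
      (fun st j => (st.1.modify i' (fun row => row.set j.toNat (g st.2)), st.2 + 1)) (arr, idx)
    = (arr.modify i' (fun row => (List.range t).foldl (fun row j => row.set j (g (idx + j))) row), idx + t) := by
  intro t
  induction t with
  | zero => intro arr idx; simp [pv_modify_id]
  | succ k ih =>
    intro arr idx
    rw [List.range_succ]
    simp only [List.map_append, List.foldl_append, List.map_cons, List.map_nil, List.foldl_cons, List.foldl_nil, ih]
    rw [pv_modify_modify]
    simp only [Int.toNat_natCast, Prod.mk.injEq]
    exact ⟨trivial, by push_cast; ring⟩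

lemma pv_fold_set_range {β : Type} (g : Nat → β) : ∀ (t : Nat) (row : List β), t ≤ row.length →
    (List.range t).foldl (fun row j => row.set j (g j)) row = (List.range t).map g ++ row.drop t := by
  intro t
  induction t with
  | zero => intro row h; simp
  | succ k ih =>
    intro row h
    rw [List.range_succ, List.foldl_append, ih row (by omega)]
    have hk : k < row.length := by omega
    have hdk : List.drop k row = row[k] :: List.drop (k+1) row := List.drop_eq_getElem_cons hk
    simp only [List.foldl_cons, List.foldl_nil, List.set_append, List.length_map, List.length_range, Nat.lt_irrefl, if_false, Nat.sub_self, hdk, List.set_cons_zero]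
    simp

-- row i of the filled grid
def pvRow (L : List Char) (m' i : Nat) : List (List Char) :=
  (List.range m').map (fun j : Nat => pvCell L ((i : Int) * (m' : Int) + (j : Int)))

-- the filling double loop produces the rows of my_string read off m' at a time
lemma pv_outer_fold (L : List Char) (m' : Nat) (r' : Nat) :
    ∀ (k : Nat), k ≤ r' →
    ((List.range k).map (fun i : Nat => (i : Int))).foldl
      (fun st i =>
        ((List.range m').map (fun j : Nat => (j : Int))).foldl
          (fun (st : List (List (List Char)) × Int) j =>
            (st.1.modify i.toNat (fun row => row.set j.toNat (pvCell L st.2)), st.2 + 1))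
          st)
      (List.replicate r' (List.replicate m' ([] : List Char)), (0 : Int))
    = ((List.range k).map (pvRow L m') ++ List.replicate (r' - k) (List.replicate m' ([] : List Char)),
       ((k * m' : Nat) : Int)) := by
  intro k
  induction k with
  | zero => intro _; simp
  | succ k ih =>
    intro hk
    rw [List.range_succ]
    simp only [List.map_append, List.foldl_append, List.map_cons, List.map_nil, List.foldl_cons,
      List.foldl_nil, ih (by omega)]
    rw [pv_inner_fold]
    simp only [Int.toNat_natCast]
    have hsplit : List.replicate (r' - k) (List.replicate m' ([] : List Char))
        = List.replicate m' ([] : List Char) :: List.replicate (r' - (k+1)) (List.replicate m' ([] : List Char)) := by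
      rw [← List.replicate_succ]
      congr 1
      omega
    have hlen : ((List.range k).map (pvRow L m')).length = k := by simp
    rw [hsplit, pv_modify_append' _ _ _ _ _ hlen]
    rw [pv_fold_set_range (fun j : Nat => pvCell L ((k * m' : Nat) + (j : Nat))) m'
        (List.replicate m' ([] : List Char)) (by simp)]
    simp only [List.drop_replicate, Nat.sub_self, List.replicate_zero, List.append_nil]
    have hrow : (List.range m').map (fun j : Nat => pvCell L ((k * m' : Nat) + (j : Nat))) = pvRow L m' k := by
      unfold pvRow
      refine List.map_congr_left ?_
      intro j hj
      have hc : ((k * m' : Nat) : Int) + (j : Int) = (k : Int) * (m' : Int) + (j : Int) := by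
        push_cast; ring
      rw [hc]
    rw [hrow]
    simp only [Prod.mk.injEq]
    refine ⟨by simp, ?_⟩
    push_cast
    ring

lemma pv_flatten_singleton {α β : Type} (f : α → β) : ∀ (l : List α),
    (l.map (fun a => [f a])).flatten = l.map f := by
  intro l
  induction l with
  | nil => simp
  | cons x t ih => simp [ih]

lemma pv_A_eval (s : String) (m c : Int) (hm : 1 ≤ m) (hc : 1 ≤ c)
    (hcm : c ≤ m ∨ PySem.Str.len s < m) :
    solution s m c = String.ofList ((List.range (s.toList.length / m.toNat)).map
      (fun i => s.toList.getD (i * m.toNat + (c - 1).toNat) ' ')) := by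
  have hmnat : m = ((m.toNat : Nat) : Int) := (Int.toNat_of_nonneg (by omega)).symm
  have hlen : PySem.Str.len s = ((s.toList.length : Nat) : Int) := PySem.Str.len_eq s
  have hr : PySem.Int.floordiv (PySem.Str.len s) m
      = ((s.toList.length / m.toNat : Nat) : Int) := by
    rw [hlen]; conv_lhs => rw [hmnat]
    exact PySem.Int.floordiv_natCast _ _
  have hrange_r : PySem.List.pyRange 0 ((s.toList.length / m.toNat : Nat) : Int) 1
      = (List.range (s.toList.length / m.toNat)).map (fun k : Nat => (k : Int)) :=
    PySem.List.pyRange_zero_natCast _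
  have hrange_m : PySem.List.pyRange 0 m 1
      = (List.range m.toNat).map (fun k : Nat => (k : Int)) := by
    conv_lhs => rw [hmnat]
    exact PySem.List.pyRange_zero_natCast _
  simp only [solution, hr, hrange_r, hrange_m]
  -- arr0 is r' blank rows
  rw [show ((List.range (s.toList.length / m.toNat)).map (fun k : Nat => (k : Int))).map
        (fun _ => ((List.range m.toNat).map (fun k : Nat => (k : Int))).map (fun _ => ([] : List Char)))
      = List.replicate (s.toList.length / m.toNat) (List.replicate m.toNat ([] : List Char)) by
    simp only [List.map_map, Function.comp_def, List.map_const', List.length_range]]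
  rw [pv_outer_fold s.toList m.toNat _ _ (le_refl _)]
  rw [List.foldl_map]
  simp only [Nat.sub_self, List.replicate_zero, List.append_nil]
  simp only [PySem.List.foldl_append_eq_flatMap, List.nil_append]
  congr 1
  rw [List.flatMap_def]
  have hmap : ∀ i ∈ List.range (s.toList.length / m.toNat),
      ((PySem.List.pyGet? ((List.range (s.toList.length / m.toNat)).map (pvRow s.toList m.toNat))
          (i : Int)).bind (fun row => PySem.List.pyGet? row (c - 1))).getD []
      = [s.toList.getD (i * m.toNat + (c - 1).toNat) ' '] := by
    intro i hi
    have hir : i < s.toList.length / m.toNat := List.mem_range.mp hi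
    have hmn : m.toNat ≤ s.toList.length := by
      by_contra hnm
      have : s.toList.length / m.toNat = 0 := Nat.div_eq_of_lt (by omega)
      omega
    have hcm' : c ≤ m := by
      rcases hcm with h | h
      · exact h
      · exfalso; rw [hlen] at h; omega
    have hcn : (c - 1).toNat < m.toNat := by omega
    have hidx : i * m.toNat + (c - 1).toNat < s.toList.length := by
      have h1 : i * m.toNat + m.toNat ≤ (s.toList.length / m.toNat) * m.toNat := by
        have hsucc := Nat.succ_le_of_lt hir
        calc i * m.toNat + m.toNat = (i + 1) * m.toNat := by ring
        _ ≤ (s.toList.length / m.toNat) * m.toNat := Nat.mul_le_mul_right _ hsucc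
      have h2 : (s.toList.length / m.toNat) * m.toNat ≤ s.toList.length := Nat.div_mul_le_self _ _
      omega
    rw [PySem.List.pyGet?_natCast]
    rw [List.getElem?_map, List.getElem?_range hir]
    simp only [Option.map_some, Option.bind_some]
    have hc1 : c - 1 = (((c - 1).toNat : Nat) : Int) := by omega
    rw [hc1, PySem.List.pyGet?_natCast]
    unfold pvRow
    rw [List.getElem?_map, List.getElem?_range hcn]
    simp only [Option.map_some]
    unfold pvCell
    have hidx2 : (i : Int) * (m.toNat : Int) + (((c - 1).toNat : Nat) : Int)
        = ((i * m.toNat + (c - 1).toNat : Nat) : Int) := by push_cast; ring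
    rw [hidx2, PySem.List.pyGet?_natCast]
    rw [List.getElem?_eq_getElem hidx]
    simp only [Option.getD_some]
    simp only [Int.toNat_natCast]
    rw [List.getD_eq_getElem _ _ hidx]
  rw [List.map_congr_left hmap]
  exact pv_flatten_singleton _ _

lemma pv_B_eval (s : String) (m c : Int) (hm : 1 ≤ m) (hc : 1 ≤ c)
    (hcm : c ≤ m ∨ PySem.Str.len s < m) :
    solution_alt s m c = String.ofList ((List.range (s.toList.length / m.toNat)).map
      (fun i => s.toList.getD (i * m.toNat + (c - 1).toNat) ' ')) := by
  have hmnat : m = ((m.toNat : Nat) : Int) := (Int.toNat_of_nonneg (by omega)).symm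
  have hlen : PySem.Str.len s = ((s.toList.length : Nat) : Int) := PySem.Str.len_eq s
  have hr : PySem.Int.floordiv (PySem.Str.len s) m
      = ((s.toList.length / m.toNat : Nat) : Int) := by
    rw [hlen]; conv_lhs => rw [hmnat]
    exact PySem.Int.floordiv_natCast _ _
  have hm0 : ¬ (m = 0) := by omega
  have hneg : ¬ (m < 0) := by omega
  have hcneg : ¬ (c - 1 < 0) := by omega
  have hrm_le : ((s.toList.length / m.toNat : Nat) : Int) * m ≤ ((s.toList.length : Nat) : Int) := by
    conv_lhs => rw [hmnat]
    push_cast [← Nat.cast_mul]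
    exact_mod_cast Nat.div_mul_le_self _ _
  have hrm_nonneg : ¬ (((s.toList.length / m.toNat : Nat) : Int) * m < 0) := by
    have : (0 : Int) ≤ ((s.toList.length / m.toNat : Nat) : Int) * m := by positivity
    omega
  have hsi : PySem.List.sliceIndices s.toList.length (some (c - 1))
      (some (((s.toList.length / m.toNat : Nat) : Int) * m)) m
      = (min (c - 1) ((s.toList.length : Nat) : Int),
         ((s.toList.length / m.toNat : Nat) : Int) * m, m) := by
    simp only [PySem.List.sliceIndices, hneg, if_false, hcneg, hrm_nonneg]
    rw [min_eq_left hrm_le]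
  simp only [solution_alt, hr, PySem.Str.slice?, PySem.Chars.slice?_eq_listSlice?]
  simp only [PySem.List.slice?, hm0, if_false, hsi]
  have hpos : (0:Int) < m := by omega
  by_cases hr0 : s.toList.length / m.toNat = 0
  · have hnotlt : ¬ (min (c - 1) ((s.toList.length : Nat) : Int)
        < ((s.toList.length / m.toNat : Nat) : Int) * m) := by
      rw [hr0]
      simp only [Nat.cast_zero, zero_mul]
      omega
    rw [if_pos hpos, if_neg hnotlt, hr0]
    simp

  · have hmn : m.toNat ≤ s.toList.length := by
      by_contra hnm
      exact hr0 (Nat.div_eq_of_lt (by omega))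
    have hcm' : c ≤ m := by
      rcases hcm with h | h
      · exact h
      · exfalso; rw [hlen] at h; omega
    have hmin : min (c - 1) ((s.toList.length : Nat) : Int) = c - 1 := min_eq_left (by omega)
    have h1 : (1:Int) ≤ ((s.toList.length / m.toNat : Nat) : Int) := by
      exact_mod_cast Nat.one_le_iff_ne_zero.mpr hr0
    have hlt : c - 1 < ((s.toList.length / m.toNat : Nat) : Int) * m := by nlinarith
    have hcount : ((((s.toList.length / m.toNat : Nat) : Int) * m - (c - 1) + m - 1) / m).toNat
        = s.toList.length / m.toNat := by
      have heq : ((s.toList.length / m.toNat : Nat) : Int) * m - (c - 1) + m - 1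
          = (m - c) + m * ((s.toList.length / m.toNat : Nat) : Int) := by ring
      rw [heq, Int.add_mul_ediv_left _ _ hm0, Int.ediv_eq_zero_of_lt (by omega) (by omega)]
      rw [zero_add, Int.toNat_natCast]
    rw [hmin]
    rw [if_pos hpos, if_pos hlt, hcount]
    simp only [Option.map_some, Option.getD_some]
    congr 1
    have hfm : ∀ x ∈ List.range (s.toList.length / m.toNat),
        s.toList[(c - 1 + m * (x : Int)).toNat]?
        = some (s.toList.getD (x * m.toNat + (c - 1).toNat) ' ') := by
      intro x hx
      have hxr : x < s.toList.length / m.toNat := List.mem_range.mp hx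
      have hidx : x * m.toNat + (c - 1).toNat < s.toList.length := by
        have hsucc := Nat.succ_le_of_lt hxr
        have h1' : x * m.toNat + m.toNat ≤ (s.toList.length / m.toNat) * m.toNat := by
          calc x * m.toNat + m.toNat = (x + 1) * m.toNat := by ring
          _ ≤ (s.toList.length / m.toNat) * m.toNat := Nat.mul_le_mul_right _ hsucc
        have h2' : (s.toList.length / m.toNat) * m.toNat ≤ s.toList.length := Nat.div_mul_le_self _ _
        omega
      have hix : c - 1 + m * (x : Int) = ((x * m.toNat + (c - 1).toNat : Nat) : Int) := by
        conv_lhs => rw [hmnat]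
        push_cast
        rw [Int.toNat_of_nonneg (by omega : (0:Int) ≤ c - 1)]
        ring
      rw [hix, Int.toNat_natCast]
      rw [List.getElem?_eq_getElem hidx]
      rw [List.getD_eq_getElem _ _ hidx]
    rw [List.filterMap_congr hfm]
    rw [show (fun x => some (s.toList.getD (x * m.toNat + (c - 1).toNat) ' '))
        = some ∘ (fun x => s.toList.getD (x * m.toNat + (c - 1).toNat) ' ') from rfl]
    rw [List.filterMap_eq_map]

lemma pv_A_neg (s : String) (m c : Int) (hm : m < 0) : solution s m c = "" := by
  have hfd := PySem.Int.floordiv_mul_add_mod ((s.toList.length : Nat) : Int) m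
  have hmb := PySem.Int.mod_neg_bounds ((s.toList.length : Nat) : Int) hm
  have hn0 : (0:Int) ≤ ((s.toList.length : Nat) : Int) := by positivity
  have hr : PySem.Int.floordiv ((s.toList.length : Nat) : Int) m ≤ 0 := by nlinarith
  have hlen : PySem.Str.len s = ((s.toList.length : Nat) : Int) := PySem.Str.len_eq s
  have hrange : PySem.List.pyRange 0 (PySem.Int.floordiv (PySem.Str.len s) m) 1 = [] := by
    rw [hlen]
    simp only [PySem.List.pyRange]
    rw [if_neg (by omega : ¬ (1:Int) = 0)]
    rw [if_pos (by omega : (0:Int) < 1)]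
    rw [if_neg (by omega : ¬ (0:Int) < PySem.Int.floordiv ((s.toList.length : Nat) : Int) m)]
    simp
  simp only [solution, hrange, List.foldl_nil]

lemma pv_B_neg (s : String) (m c : Int) (hm : m < 0) : solution_alt s m c = "" := by
  have hfd := PySem.Int.floordiv_mul_add_mod ((s.toList.length : Nat) : Int) m
  have hmb := PySem.Int.mod_neg_bounds ((s.toList.length : Nat) : Int) hm
  have hn0 : (0:Int) ≤ ((s.toList.length : Nat) : Int) := by positivity
  have hge : ((s.toList.length : Nat) : Int) ≤ PySem.Int.floordiv ((s.toList.length : Nat) : Int) m * m := by nlinarith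
  have hlen : PySem.Str.len s = ((s.toList.length : Nat) : Int) := PySem.Str.len_eq s
  have hm0 : ¬ (m = 0) := by omega
  simp only [solution_alt, hlen, PySem.Str.slice?, PySem.Chars.slice?_eq_listSlice?,
    PySem.List.slice?, PySem.List.sliceIndices, hm0, if_false]
  split_ifs <;> first
    | omega
    | simp

lemma pv_A_small (s : String) (m c : Int) (hm : 1 ≤ m) (hnm : PySem.Str.len s < m) :
    solution s m c = "" := by
  have hlen : PySem.Str.len s = ((s.toList.length : Nat) : Int) := PySem.Str.len_eq s
  have hmnat : m = ((m.toNat : Nat) : Int) := (Int.toNat_of_nonneg (by omega)).symm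
  have hr : PySem.Int.floordiv (PySem.Str.len s) m = ((s.toList.length / m.toNat : Nat) : Int) := by
    rw [hlen]; conv_lhs => rw [hmnat]
    exact PySem.Int.floordiv_natCast _ _
  have hr0 : s.toList.length / m.toNat = 0 := Nat.div_eq_of_lt (by omega)
  have hrange : PySem.List.pyRange 0 (PySem.Int.floordiv (PySem.Str.len s) m) 1 = [] := by
    rw [hr, hr0]
    simp [PySem.List.pyRange_zero_natCast 0]
  simp only [solution, hrange, List.foldl_nil]

lemma pv_B_small (s : String) (m c : Int) (hm : 1 ≤ m) (hnm : PySem.Str.len s < m) :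
    solution_alt s m c = "" := by
  have hlen : PySem.Str.len s = ((s.toList.length : Nat) : Int) := PySem.Str.len_eq s
  have hmnat : m = ((m.toNat : Nat) : Int) := (Int.toNat_of_nonneg (by omega)).symm
  have hr : PySem.Int.floordiv (PySem.Str.len s) m = ((s.toList.length / m.toNat : Nat) : Int) := by
    rw [hlen]; conv_lhs => rw [hmnat]
    exact PySem.Int.floordiv_natCast _ _
  have hr0 : s.toList.length / m.toNat = 0 := Nat.div_eq_of_lt (by omega)
  have hm0 : ¬ (m = 0) := by omega
  simp only [solution_alt, hr, hr0, Nat.cast_zero, zero_mul, PySem.Str.slice?,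
    PySem.Chars.slice?_eq_listSlice?, PySem.List.slice?, PySem.List.sliceIndices, hm0, if_false]
  split_ifs <;> first
    | omega
    | simp

-- ===== VERDICT (by name: the statement is the Claim_ definition above) =====
theorem solution_spec : Claim_equal_solution := by
  intro my_string m c _hdom hpre
  unfold Spec_solution
  rcases hpre with hneg | ⟨hm, hsmall | ⟨hc, hcm⟩⟩
  · rw [pv_A_neg my_string m c hneg, pv_B_neg my_string m c hneg]
  · rw [pv_A_small my_string m c hm hsmall, pv_B_small my_string m c hm hsmall]
  · rw [pv_A_eval my_string m c hm hc (Or.inl hcm), pv_B_eval my_string m c hm hc (Or.inl hcm)]
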